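-- pv_equiv track=rewrite | github.com/jackliuto/model_diff_XADD | policy_learning/DQN/agents.py | gen_action_index_dict
-- ===== SOURCE A (Python) =====
-- import itertools
--
-- def gen_action_index_dict(action_name_list):
--     action_index_dict = {}
--     bool_combos = [list(i) for i in itertools.product([0, 1], repeat=len(action_name_list))]
--     action_list = []
--     for b in bool_combos:
--         a = {}
--         for i, v in enumerate(b):
--             a[action_name_list[i]] = True if v==1 else False
--         action_list.append(a)
--     for i, v in enumerate(action_list):
--         action_index_dict[i] = v
--     return action_index_dict
-- ===== SOURCE B (Python) =====
-- def gen_action_index_dict(action_name_list):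
--     n = len(action_name_list)
--     action_index_dict = {}
--     for i in range(2 ** n):
--         action_index_dict[i] = {
--             name: bool((i >> (n - 1 - j)) & 1)
--             for j, name in enumerate(action_name_list)
--         }
--     return action_index_dict
-- ===== Notes on version B (the rewrite author's own statement) =====
-- stated objective: idiomatic
-- what changed: B drops itertools.product and the intermediate bool_combos/action_list materialisations, deriving each boolean combination arithmetically from the bits of its own index i ((i >> (n-1-j)) & 1, msb first) while building the result dict in one pass.
import Mathlib
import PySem

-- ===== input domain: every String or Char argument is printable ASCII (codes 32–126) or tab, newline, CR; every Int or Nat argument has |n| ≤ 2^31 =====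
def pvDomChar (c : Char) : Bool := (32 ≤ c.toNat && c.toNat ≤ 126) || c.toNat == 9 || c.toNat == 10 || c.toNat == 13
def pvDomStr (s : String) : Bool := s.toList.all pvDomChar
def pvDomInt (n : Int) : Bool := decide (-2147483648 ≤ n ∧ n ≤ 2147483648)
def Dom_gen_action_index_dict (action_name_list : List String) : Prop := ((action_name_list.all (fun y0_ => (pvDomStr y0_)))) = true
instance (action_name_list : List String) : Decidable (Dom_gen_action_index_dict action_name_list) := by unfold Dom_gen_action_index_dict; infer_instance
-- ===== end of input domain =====

-- B derives each boolean combination from the bits of its index instead of materialising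
-- itertools.product; same output, stated objective: idiomatic (no speed claim).

-- ===== PORT A =====
-- itertools.product([0, 1], repeat=n) as A materialises it (first factor varies slowest).
def pvProduct01 : Nat → List (List Int)
  | 0 => [[]]
  | n + 1 => ([0, 1] : List Int).flatMap (fun a => (pvProduct01 n).map (fun rest => a :: rest))

def gen_action_index_dict (action_name_list : List String) : List (Int × List (String × Bool)) :=
  let bool_combos := pvProduct01 action_name_list.length
  let action_list := bool_combos.map (fun b =>
    -- inner dict a; action_name_list[i] is always in range (|b| = |action_name_list|)
    ((PySem.List.enumerate b 0).foldl
      (fun (a : PySem.Dict String Bool) iv =>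
        a.insert (PySem.List.pyGetD action_name_list iv.1 "") (iv.2 == 1))
      PySem.Dict.empty).items)
  ((PySem.List.enumerate action_list 0).foldl
    (fun (d : PySem.Dict Int (List (String × Bool))) iv => d.insert iv.1 iv.2)
    PySem.Dict.empty).items

-- ===== PORT B =====
def gen_action_index_dict_alt (action_name_list : List String) : List (Int × List (String × Bool)) :=
  -- for i in range(2 ** n): dict[i] = {name: bool((i >> (n-1-j)) & 1) for j, name in enumerate(...)}
  -- shift amount (n-1-j).toNat is exact: 0 ≤ n-1-j for every j produced by enumerate
  ((PySem.List.pyRange 0 (2 ^ action_name_list.length) 1).foldl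
    (fun (d : PySem.Dict Int (List (String × Bool))) i =>
      d.insert i
        (((PySem.List.enumerate action_name_list 0).foldl
          (fun (a : PySem.Dict String Bool) jn =>
            a.insert jn.2
              (PySem.Int.band (i >>> (((action_name_list.length : Int) - 1 - jn.1).toNat)) 1 == 1))
          PySem.Dict.empty).items))
    PySem.Dict.empty).items

-- ===== PRECONDITION & SPEC =====
def Spec_gen_action_index_dict (action_name_list : List String) (out : List (Int × List (String × Bool))) : Prop := out = gen_action_index_dict_alt action_name_list
instance (action_name_list : List String) (out : List (Int × List (String × Bool))) : Decidable (Spec_gen_action_index_dict action_name_list out) := by unfold Spec_gen_action_index_dict; infer_instance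

-- ===== CLAIM (what is proved, stated in full; the proofs are below) =====
def Claim_equal_gen_action_index_dict : Prop := ∀ (action_name_list : List String), Dom_gen_action_index_dict action_name_list → Spec_gen_action_index_dict action_name_list (gen_action_index_dict action_name_list)

-- ===== LEMMAS AND PROOFS =====

-- bits of i, most significant first, n bits
def pvEncode : Nat → Nat → List Int
  | 0, _ => []
  | n + 1, i => (Int.ofNat (i / 2 ^ n % 2)) :: pvEncode n (i % 2 ^ n)

theorem pvEncode_length (n i : Nat) : (pvEncode n i).length = n := by
  induction n generalizing i with
  | zero => rfl
  | succ n ih => simp [pvEncode, ih]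

theorem pv_mod_pow_div_mod (i n k : Nat) (h : k < n) :
    i % 2 ^ n / 2 ^ k % 2 = i / 2 ^ k % 2 := by
  conv_rhs => rw [← Nat.div_add_mod i (2 ^ n)]
  have h1 : 2 ^ n * (i / 2 ^ n) = 2 ^ k * (2 ^ (n - k) * (i / 2 ^ n)) := by
    rw [← Nat.mul_assoc, ← Nat.pow_add]
    congr 2
    omega
  rw [h1, Nat.add_comm, Nat.add_mul_div_left _ _ (Nat.two_pow_pos k)]
  have h2 : 2 ^ (n - k) * (i / 2 ^ n) = 2 ^ (n - k - 1) * (i / 2 ^ n) * 2 := by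
    have hp : (2 : Nat) ^ (n - k) = 2 ^ (n - k - 1) * 2 := by
      rw [← Nat.pow_succ]
      congr 1
      omega
    rw [hp]
    ring
  rw [h2, Nat.add_mul_mod_self_right]

theorem pvEncode_getElem (n i j : Nat) (h : j < n) :
    (pvEncode n i)[j]'(by rw [pvEncode_length]; exact h) =
      Int.ofNat (i / 2 ^ (n - 1 - j) % 2) := by
  induction n generalizing i j with
  | zero => omega
  | succ n ih =>
    cases j with
    | zero => simp [pvEncode]
    | succ j =>
      have hj : j < n := by omega
      have : n + 1 - 1 - (j + 1) = n - 1 - j := by omega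
      rw [this]
      simp only [pvEncode, List.getElem_cons_succ]
      rw [ih (i % 2 ^ n) j hj, pv_mod_pow_div_mod i n (n - 1 - j) (by omega)]

theorem pvProduct01_eq (n : Nat) :
    pvProduct01 n = (List.range (2 ^ n)).map (pvEncode n) := by
  induction n with
  | zero => rfl
  | succ n ih =>
    have hsplit : 2 ^ (n + 1) = 2 ^ n + 2 ^ n := by ring
    rw [pvProduct01, hsplit, List.range_add, List.map_append, List.map_map]
    simp only [List.flatMap_cons, List.flatMap_nil, List.append_nil, ih, List.map_map]
    congr 1
    · refine List.map_congr_left (fun k hk => ?_)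
      have hk' : k < 2 ^ n := List.mem_range.mp hk
      simp [Function.comp, pvEncode, Nat.div_eq_of_lt hk', Nat.mod_eq_of_lt hk']
    · refine List.map_congr_left (fun k hk => ?_)
      have hk' : k < 2 ^ n := List.mem_range.mp hk
      have hdiv : (2 ^ n + k) / 2 ^ n = 1 := by
        rw [Nat.add_comm, Nat.add_div_right _ (Nat.two_pow_pos n),
          Nat.div_eq_of_lt hk']
      have hmod : (2 ^ n + k) % 2 ^ n = k := by
        rw [Nat.add_comm, Nat.add_mod_right, Nat.mod_eq_of_lt hk']
      simp [Function.comp, pvEncode, hdiv, hmod]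

theorem pv_foldl_insert_congr {α β κ ν : Type} [BEq κ] (f : α → κ × ν) (g : β → κ × ν)
    (xs : List α) (ys : List β) (h : xs.map f = ys.map g) (e : PySem.Dict κ ν) :
    xs.foldl (fun d a => d.insert (f a).1 (f a).2) e
      = ys.foldl (fun d b => d.insert (g b).1 (g b).2) e := by
  induction xs generalizing ys e with
  | nil => cases ys with
    | nil => rfl
    | cons y ys => simp at h
  | cons x xs ih =>
    cases ys with
    | nil => simp at h
    | cons y ys =>
      simp only [List.map_cons, List.cons.injEq] at h
      simp only [List.foldl_cons, h.1]
      exact ih ys h.2 _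

-- the inner dict built from the j-th bit list equals the one built from the bits of i
theorem pv_inner_eq (L : List String) (i : Nat) :
    (PySem.List.enumerate (pvEncode L.length i) 0).foldl
      (fun (a : PySem.Dict String Bool) iv =>
        a.insert (PySem.List.pyGetD L iv.1 "") (iv.2 == 1))
      PySem.Dict.empty
    = (PySem.List.enumerate L 0).foldl
      (fun (a : PySem.Dict String Bool) jn =>
        a.insert jn.2
          (PySem.Int.band ((i : Int) >>> (((L.length : Int) - 1 - jn.1).toNat)) 1 == 1))
      PySem.Dict.empty := by
  refine pv_foldl_insert_congr
    (f := fun iv : Int × Int => (PySem.List.pyGetD L iv.1 "", iv.2 == 1))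
    (g := fun jn : Int × String =>
      (jn.2, PySem.Int.band ((i : Int) >>> (((L.length : Int) - 1 - jn.1).toNat)) 1 == 1))
    _ _ ?_ _
  apply List.ext_getElem
  · simp [PySem.List.length_enumerate, pvEncode_length]
  · intro j hj1 hj2
    have hjL : j < L.length := by
      simpa [PySem.List.length_enumerate] using hj2
    have hjE : j < (pvEncode L.length i).length := by
      rw [pvEncode_length]; exact hjL
    simp only [List.getElem_map, PySem.List.getElem_enumerate]
    have hkey : PySem.List.pyGetD L ((0 : Int) + (j : Int)) "" = L[j] := by
      rw [Int.zero_add]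
      simpa using PySem.List.pyGetD_ofNat (xs := L) (n := j) (d := "") (by simpa using hjL)
    have htoNat : (((L.length : Int)) - 1 - ((0 : Int) + (j : Int))).toNat = L.length - 1 - j := by
      omega
    have hshift : ((i : Int) >>> (L.length - 1 - j)) = ((i >>> (L.length - 1 - j) : Nat) : Int) := by
      simp [Int.natCast_shiftRight]
    have hval :
        PySem.Int.band ((i : Int) >>> ((((L.length : Int)) - 1 - ((0 : Int) + (j : Int))).toNat)) 1
          = Int.ofNat (i / 2 ^ (L.length - 1 - j) % 2) := by
      rw [htoNat, hshift]
      have := PySem.Int.band_natCast (i >>> (L.length - 1 - j)) 1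
      rw [show ((1 : Int)) = ((1 : Nat) : Int) by rfl, this,
        Nat.and_one_is_mod, Nat.shiftRight_eq_div_pow]
      rfl
    rw [hkey, hval, pvEncode_getElem L.length i j hjL]

theorem pv_main (L : List String) :
    gen_action_index_dict L = gen_action_index_dict_alt L := by
  simp only [gen_action_index_dict, gen_action_index_dict_alt]
  set action_list := (pvProduct01 L.length).map (fun b =>
    (((PySem.List.enumerate b 0).foldl
      (fun (a : PySem.Dict String Bool) iv =>
        a.insert (PySem.List.pyGetD L iv.1 "") (iv.2 == 1))
      PySem.Dict.empty).items)) with hal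
  rw [PySem.Dict.items_foldl_insert_fresh (PySem.List.enumerate action_list 0)
        (fun iv => iv.1) (fun iv => iv.2) PySem.Dict.empty
        (fun a _ => PySem.Dict.contains_empty _)
        (by rw [PySem.List.map_fst_enumerate]; exact PySem.List.nodup_pyRange_one _ _),
      PySem.Dict.items_foldl_insert_fresh (PySem.List.pyRange 0 (2 ^ L.length) 1)
        (fun i => i)
        (fun i =>
          (((PySem.List.enumerate L 0).foldl
            (fun (a : PySem.Dict String Bool) jn =>
              a.insert jn.2
                (PySem.Int.band (i >>> (((L.length : Int) - 1 - jn.1).toNat)) 1 == 1))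
            PySem.Dict.empty).items))
        PySem.Dict.empty
        (fun a _ => PySem.Dict.contains_empty _)
        (by simpa using PySem.List.nodup_pyRange_one 0 ((2 : Int) ^ L.length))]
  simp only [show (PySem.Dict.empty : PySem.Dict Int (List (String × Bool))).items = [] from rfl,
    List.nil_append]
  have hlen : action_list.length = 2 ^ L.length := by
    rw [hal, List.length_map, pvProduct01_eq, List.length_map, List.length_range]
  apply List.ext_getElem
  · simp only [List.length_map, PySem.List.length_enumerate, PySem.List.length_pyRange_one, hlen]
    have hc : ((2 : Int) ^ L.length) = ((2 ^ L.length : Nat) : Int) := by push_cast; ring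
    rw [hc]
    omega
  · intro k hk1 hk2
    have hk : k < 2 ^ L.length := by
      simpa [PySem.List.length_enumerate, hlen] using hk1
    have hkal : k < action_list.length := by rw [hlen]; exact hk
    simp only [List.getElem_map, PySem.List.getElem_enumerate, PySem.List.getElem_pyRange_one]
    refine Prod.ext rfl ?_
    simp only [Int.zero_add, hal, pvProduct01_eq, List.getElem_map, List.getElem_range]
    exact congrArg PySem.Dict.items (pv_inner_eq L k)

-- ===== VERDICT (by name: the statement is the Claim_ definition above) =====
theorem gen_action_index_dict_spec : Claim_equal_gen_action_index_dict := by
  intro L _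
  unfold Spec_gen_action_index_dict
  exact pv_main L
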